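-- pv_equiv track=rewrite | github.com/michaelkimm/Algorithm-problem-solving-thought-process-re-record | Python/BaekJun/Baek14890.py | getHorizontalCrossable
-- ===== SOURCE A (Python) =====
-- def getHorizontalCrossable(graph, N, L):
--   answer = 0
--   for i in range(N):
--     block_cnt = 0
--     prev_height = -1
--     crossable = True
--     for j in range(N):
--       d = graph[i][j] - prev_height
--       # 평지
--       if prev_height == -1 or d == 0:
--         prev_height = graph[i][j]
--         block_cnt += 1
--         continue
--       # 이전 칸과 2칸 이상 차이
--       if abs(d) >= 2:
--         crossable = False
--         break
--
--       # 올라갈 경우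
--       if d == 1:
--         if block_cnt < L:
--           crossable = False
--           break
--         else:
--           block_cnt = 1
--           prev_height = graph[i][j]
--           continue
--       # 내려올 경우
--       if d == -1:
--         block_remainings = N - j
--         # 남은 블럭이 L보다 적은 경우
--         if block_remainings < L:
--           crossable = False
--           break
--         else:
--           predictable_blocks = set(graph[i][j:j + L])
--           # 현재~앞 L개 블럭 내 숫자가 한개만 존재
--           if len(predictable_blocks) == 1:
--             block_cnt = -(L - 1)
--             prev_height = graph[i][j]
--             continue
--           else:
--             crossable = False
--             break
--
--     if crossable:
--       answer += 1
--   return answer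
-- ===== SOURCE B (Python) =====
-- def getHorizontalCrossable(graph, N, L):
--   answer = 0
--   for i in range(N):
--     row = graph[i][:N]
--     # run-length encode the row: list of (height, count)
--     runs = []
--     for h in row:
--       if runs and runs[-1][0] == h:
--         runs[-1] = (h, runs[-1][1] + 1)
--       else:
--         runs.append((h, 1))
--     # walk the run boundaries; avail = cells of the current run usable for an ascent ramp
--     ok = True
--     avail = runs[0][1] if runs else 0
--     for k in range(1, len(runs)):
--       h, c = runs[k]
--       d = h - runs[k - 1][0]
--       if d == 1 and avail >= L:
--         avail = c
--       elif d == -1 and c >= L: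
--         avail = c - L
--       else:
--         ok = False
--         break
--     if ok:
--       answer += 1
--   return answer
-- ===== Notes on version B (the rewrite author's own statement) =====
-- stated objective: alternative
-- what changed: B run-length-encodes each row once and judges it by scanning run boundaries (ascent needs the available left-run length >= L, descent needs the right-run length >= L), replacing A's cell-by-cell state machine with its block counter, sentinel prev_height=-1 and per-descent set(row[j:j+L]) construction.
-- outside the precondition, e.g. on getHorizontalCrossable([[0, -1, 9], [0, 0, 0], [0, 0, 0]], 3, 1): A returns 3, B returns 2; on getHorizontalCrossable([[1, 1, 0], [0, 0, 0], [0, 0, 0]], 3, 0): A returns 2, B returns 3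
import Mathlib
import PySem

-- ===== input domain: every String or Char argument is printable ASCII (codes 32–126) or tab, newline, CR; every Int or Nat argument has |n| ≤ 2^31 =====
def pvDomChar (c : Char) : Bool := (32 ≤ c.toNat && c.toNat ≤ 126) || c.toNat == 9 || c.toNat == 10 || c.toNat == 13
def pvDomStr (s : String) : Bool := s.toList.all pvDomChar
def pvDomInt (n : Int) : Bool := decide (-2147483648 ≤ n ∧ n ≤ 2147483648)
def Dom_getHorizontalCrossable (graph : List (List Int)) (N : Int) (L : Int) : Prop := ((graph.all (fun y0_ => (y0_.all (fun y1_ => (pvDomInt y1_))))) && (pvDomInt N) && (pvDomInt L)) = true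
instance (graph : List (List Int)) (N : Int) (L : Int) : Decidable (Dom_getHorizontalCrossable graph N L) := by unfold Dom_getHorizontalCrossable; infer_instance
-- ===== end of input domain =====

-- B replaces A's cell-by-cell state machine by a run-length encoding of each row and a
-- scan over run boundaries (objective: alternative algorithm, same asymptotic cost).

-- ===== PORT A =====
-- inner loop of A over j = 0..N-1 with state (block_cnt, prev_height); early 'break'
-- with crossable=False is an immediate 'false', falling off the loop end is 'true'
def pvAInner (row : List Int) (N L : Int) (j block_cnt prev_height : Int) : Bool :=
  if h : j < N then
    let x := (PySem.List.pyGet? row j).getD 0   -- graph[i][j]; in range under Pre_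
    let d := x - prev_height
    if prev_height = -1 ∨ d = 0 then
      pvAInner row N L (j + 1) (block_cnt + 1) x
    else if 2 ≤ d.natAbs then false
    else if d = 1 then
      if block_cnt < L then false
      else pvAInner row N L (j + 1) 1 x
    else if d = -1 then
      if N - j < L then false
      else if (PySem.Set.ofList (PySem.List.slice row (some j) (some (j + L)))).length = 1 then
        pvAInner row N L (j + 1) (-(L - 1)) x
      else false
    else pvAInner row N L (j + 1) block_cnt prev_height
  else true
termination_by (N - j).toNat
decreasing_by all_goals omega

def getHorizontalCrossable (graph : List (List Int)) (N : Int) (L : Int) : Int :=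
  (PySem.List.pyRange 0 N 1).foldl
    (fun answer i =>
      if pvAInner ((PySem.List.pyGet? graph i).getD []) N L 0 0 (-1) then answer + 1 else answer)
    0

-- ===== PORT B =====
-- one step of Source B's run-length loop: extend the last run or start a new one
def pvRleStep (runs : List (Int × Int)) (h : Int) : List (Int × Int) :=
  match runs.getLast? with
  | some (h0, c) => if h0 = h then runs.dropLast ++ [(h, c + 1)] else runs ++ [(h, 1)]
  | none => [(h, 1)]

-- Source B's boundary scan: ph = previous run's height, avail = usable cells of the previous run
def pvBScan (L ph avail : Int) (rest : List (Int × Int)) : Bool :=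
  match rest with
  | [] => true
  | (h, c) :: t =>
    let d := h - ph
    if d = 1 ∧ avail ≥ L then pvBScan L h c t
    else if d = -1 ∧ c ≥ L then pvBScan L h (c - L) t
    else false

def pvBRow (L : Int) (row : List Int) : Bool :=
  match row.foldl pvRleStep [] with
  | [] => true
  | (h, c) :: rest => pvBScan L h c rest

def getHorizontalCrossable_alt (graph : List (List Int)) (N : Int) (L : Int) : Int :=
  (PySem.List.pyRange 0 N 1).foldl
    (fun answer i =>
      if pvBRow L (PySem.List.slice ((PySem.List.pyGet? graph i).getD []) (some 0) (some N))
      then answer + 1 else answer)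
    0

-- ===== PRECONDITION & SPEC =====
-- Pre_ restricts to the natural domain of the problem (BOJ 14890): the N×N board is present,
-- the ramp length L is at least 1, and no height equals -1 — L ≤ 0 and height -1 collide with
-- A's empty-slice set test and its prev_height = -1 sentinel, whose values there are artefacts.
def Pre_getHorizontalCrossable (graph : List (List Int)) (N : Int) (L : Int) : Prop :=
  0 < N → (1 ≤ L ∧ N ≤ graph.length ∧
    ∀ row ∈ graph.take N.toNat, N ≤ row.length ∧ ∀ x ∈ row.take N.toNat, x ≠ -1)
instance (graph : List (List Int)) (N : Int) (L : Int) : Decidable (Pre_getHorizontalCrossable graph N L) := by unfold Pre_getHorizontalCrossable; infer_instance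

def pvWitness_getHorizontalCrossable : List (List Int) × Int × Int := ([[2, 2], [2, 1]], 2, 1)

def Spec_getHorizontalCrossable (graph : List (List Int)) (N : Int) (L : Int) (out : Int) : Prop := out = getHorizontalCrossable_alt graph N L
instance (graph : List (List Int)) (N : Int) (L : Int) (out : Int) : Decidable (Spec_getHorizontalCrossable graph N L out) := by unfold Spec_getHorizontalCrossable; infer_instance

-- ===== CLAIM (what is proved, stated in full; the proofs are below) =====
def Claim_equal_getHorizontalCrossable : Prop := ∀ (graph : List (List Int)) (N : Int) (L : Int), Dom_getHorizontalCrossable graph N L → Pre_getHorizontalCrossable graph N L → Spec_getHorizontalCrossable graph N L (getHorizontalCrossable graph N L)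

-- ===== LEMMAS AND PROOFS =====

-- A's inner loop re-expressed as structural recursion on the suffix of the (truncated) row
def pvAS (L : Int) : List Int → Int → Int → Bool
  | [], _, _ => true
  | x :: xs, b, p =>
    let d := x - p
    if p = -1 ∨ d = 0 then pvAS L xs (b + 1) x
    else if 2 ≤ d.natAbs then false
    else if d = 1 then
      if b < L then false else pvAS L xs 1 x
    else if d = -1 then
      if ((x :: xs).length : Int) < L then false
      else if (PySem.Set.ofList ((x :: xs).take L.toNat)).length = 1 then pvAS L xs (-(L - 1)) x
      else false
    else pvAS L xs b p

-- recursive run-length encoder (spec of Source B's foldl)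
def pvRleF (h c : Int) : List Int → List (Int × Int)
  | [] => [(h, c)]
  | x :: t => if x = h then pvRleF h (c + 1) t else (h, c) :: pvRleF x 1 t

def pvExpand (rs : List (Int × Int)) : List Int := rs.flatMap (fun p => List.replicate p.2.toNat p.1)

def pvChain (p : Int) : List (Int × Int) → Prop
  | [] => True
  | (h, c) :: t => h ≠ p ∧ 1 ≤ c ∧ pvChain h t

theorem pv_set_rep_aux (x : Int) (n : Nat) :
    List.foldl PySem.Set.add [x] (List.replicate n x) = [x] := by
  induction n with
  | zero => rfl
  | succ k ih =>
    rw [List.replicate_succ, List.foldl_cons]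
    have h1 : PySem.Set.add [x] x = [x] := by simp [PySem.Set.add, PySem.Set.contains]
    rw [h1, ih]

theorem pv_set_replicate (x : Int) (n : Nat) :
    PySem.Set.ofList (List.replicate (n + 1) x) = [x] := by
  rw [List.replicate_succ]
  show List.foldl PySem.Set.add [] (x :: List.replicate n x) = [x]
  rw [List.foldl_cons]
  have h1 : PySem.Set.add [] x = [x] := by simp [PySem.Set.add, PySem.Set.contains]
  rw [h1, pv_set_rep_aux]

theorem pv_rle_aux (xs : List Int) : ∀ (acc : List (Int × Int)) (h c : Int),
    List.foldl pvRleStep (acc ++ [(h, c)]) xs = acc ++ pvRleF h c xs := by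
  induction xs with
  | nil => intro acc h c; simp [pvRleF]
  | cons x t ih =>
    intro acc h c
    rw [List.foldl_cons]
    by_cases hx : x = h
    · subst hx
      have hstep : pvRleStep (acc ++ [(x, c)]) x = acc ++ [(x, c + 1)] := by
        simp [pvRleStep]
      rw [hstep, ih, pvRleF, if_pos rfl]
    · have hstep : pvRleStep (acc ++ [(h, c)]) x = (acc ++ [(h, c)]) ++ [(x, 1)] := by
        simp [pvRleStep, Ne.symm hx]
      rw [hstep, ih ((acc ++ [(h, c)])) x 1, pvRleF, if_neg hx]
      simp

theorem pv_rle_spec (x : Int) (xs : List Int) :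
    List.foldl pvRleStep [] (x :: xs) = pvRleF x 1 xs := by
  rw [List.foldl_cons]
  have h1 : pvRleStep [] x = [(x, 1)] := by rfl
  rw [h1]
  simpa using pv_rle_aux xs [] x 1

theorem pv_rleF_chain (xs : List Int) : ∀ (h c : Int), 1 ≤ c →
    ∃ c' rest, pvRleF h c xs = (h, c') :: rest ∧ c ≤ c' ∧ pvChain h rest ∧
      ∀ q ∈ rest, q.1 ∈ xs := by
  induction xs with
  | nil => intro h c hc; exact ⟨c, [], rfl, le_refl _, trivial, by simp⟩
  | cons x t ih =>
    intro h c hc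
    by_cases hx : x = h
    · subst hx
      obtain ⟨c', rest, heq, hle, hch, hmem⟩ := ih x (c + 1) (by omega)
      refine ⟨c', rest, ?_, by omega, hch, fun q hq => List.mem_cons_of_mem _ (hmem q hq)⟩
      rw [pvRleF, if_pos rfl, heq]
    · obtain ⟨c'', rest', heq, hle, hch, hmem⟩ := ih x 1 (le_refl _)
      refine ⟨c, (x, c'') :: rest', ?_, le_refl _, ⟨hx, by omega, hch⟩, ?_⟩
      · rw [pvRleF, if_neg hx, heq]
      · intro q hq
        rcases List.mem_cons.mp hq with hq | hq
        · subst hq; exact List.mem_cons_self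
        · exact List.mem_cons_of_mem _ (hmem q hq)

theorem pv_expand_rleF (xs : List Int) : ∀ (h c : Int), 0 ≤ c →
    pvExpand (pvRleF h c xs) = List.replicate c.toNat h ++ xs := by
  induction xs with
  | nil => intro h c hc; simp [pvRleF, pvExpand]
  | cons x t ih =>
    intro h c hc
    by_cases hx : x = h
    · subst hx
      rw [pvRleF, if_pos rfl, ih x (c + 1) (by omega)]
      have h1 : (c + 1).toNat = c.toNat + 1 := by omega
      rw [h1, List.replicate_succ']
      simp
    · rw [pvRleF, if_neg hx]
      have h1 : pvExpand ((h, c) :: pvRleF x 1 t) =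
          List.replicate c.toNat h ++ pvExpand (pvRleF x 1 t) := by simp [pvExpand]
      rw [h1, ih x 1 (by omega)]
      simp

theorem pv_flat (L : Int) (k : Nat) (x : Int) (ys : List Int) : ∀ (b : Int),
    pvAS L (List.replicate k x ++ ys) b x = pvAS L ys (b + k) x := by
  induction k with
  | zero => intro b; simp
  | succ m ih =>
    intro b
    rw [List.replicate_succ, List.cons_append, pvAS]
    simp only [sub_self, or_true, if_true]
    rw [ih (b + 1)]
    congr 1
    push_cast
    ring

theorem pv_main (L : Int) (hL : 1 ≤ L) (rs : List (Int × Int)) : ∀ (p b : Int), p ≠ -1 →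
    pvChain p rs → (∀ q ∈ rs, q.1 ≠ -1) →
    pvAS L (pvExpand rs) b p = pvBScan L p b rs := by
  induction rs with
  | nil => intro p b _ _ _; simp [pvExpand, pvAS, pvBScan]
  | cons hd rest ih =>
    obtain ⟨h, c⟩ := hd
    intro p b hp hch hne
    obtain ⟨hhp, hc, hch'⟩ := hch
    have hhne : h ≠ -1 := hne (h, c) List.mem_cons_self
    have hrne : ∀ q ∈ rest, q.1 ≠ -1 := fun q hq => hne q (List.mem_cons_of_mem _ hq)
    have hct : c.toNat = (c.toNat - 1) + 1 := by omega
    have hexp : pvExpand ((h, c) :: rest) =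
        h :: (List.replicate (c.toNat - 1) h ++ pvExpand rest) := by
      show (List.replicate c.toNat h ++ pvExpand rest) = _
      rw [hct, List.replicate_succ]
      simp
    rw [hexp, pvAS]
    have hd0 : h - p ≠ 0 := by intro h0; exact hhp (by omega)
    rw [if_neg (by simp only [not_or]; exact ⟨hp, hd0⟩)]
    by_cases hd1 : h - p = 1
    · rw [if_neg (by rw [hd1]; decide), if_pos hd1]
      show _ = pvBScan L p b ((h, c) :: rest)
      rw [pvBScan]
      by_cases hbL : b < L
      · rw [if_pos hbL, if_neg (by omega : ¬(h - p = 1 ∧ b ≥ L)),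
            if_neg (by omega : ¬(h - p = -1 ∧ c ≥ L))]
      · rw [if_neg hbL, if_pos (⟨hd1, by omega⟩ : h - p = 1 ∧ b ≥ L)]
        rw [pv_flat]
        have hb1 : (1 : Int) + ((c.toNat - 1 : Nat) : Int) = c := by omega
        rw [hb1, ih h c hhne hch' hrne]
    · by_cases hd2 : h - p = -1
      · rw [if_neg (by rw [hd2]; decide), if_neg hd1, if_pos hd2]
        show _ = pvBScan L p b ((h, c) :: rest)
        rw [pvBScan]
        rw [if_neg (by omega : ¬(h - p = 1 ∧ b ≥ L))]
        have hlen : ((h :: (List.replicate (c.toNat - 1) h ++ pvExpand rest)).length : Int) =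
            c + (pvExpand rest).length := by
          simp [List.length_append]
          omega
        by_cases hcL : c ≥ L
        · rw [if_pos (⟨hd2, hcL⟩ : h - p = -1 ∧ c ≥ L)]
          rw [if_neg (by rw [hlen]; omega)]
          have htake : (h :: (List.replicate (c.toNat - 1) h ++ pvExpand rest)).take L.toNat =
              List.replicate L.toNat h := by
            have h2 : h :: (List.replicate (c.toNat - 1) h ++ pvExpand rest) =
                List.replicate c.toNat h ++ pvExpand rest := by rw [hct, List.replicate_succ]; simp
            rw [h2, List.take_append_of_le_length (by simp; omega), List.take_replicate]
            congr 1
            omega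
          rw [htake]
          have hLt : L.toNat = (L.toNat - 1) + 1 := by omega
          rw [hLt, pv_set_replicate]
          rw [if_pos (by simp), pv_flat]
          have hb2 : (-(L - 1)) + ((c.toNat - 1 : Nat) : Int) = c - L := by omega
          rw [hb2, ih h (c - L) hhne hch' hrne]
        · rw [if_neg (by omega : ¬(h - p = -1 ∧ c ≥ L))]
          by_cases hll : ((h :: (List.replicate (c.toNat - 1) h ++ pvExpand rest)).length : Int) < L
          · rw [if_pos hll]
          · rw [if_neg hll]
            -- rest is nonempty, its first height h2 ≠ h appears in the take-window
            have hrest_ne : rest ≠ [] := by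
              intro h0
              subst h0
              simp [pvExpand] at hll
              omega
            obtain ⟨⟨h2, c2⟩, t2, rfl⟩ := List.exists_cons_of_ne_nil hrest_ne
            obtain ⟨hh2, hc2, _⟩ := hch'
            have hexp2 : pvExpand ((h2, c2) :: t2) = h2 :: (List.replicate (c2.toNat - 1) h2 ++ pvExpand t2) := by
              show (List.replicate c2.toNat h2 ++ pvExpand t2) = _
              rw [(by omega : c2.toNat = (c2.toNat - 1) + 1), List.replicate_succ]
              simp
            have hwin : (h :: (List.replicate (c.toNat - 1) h ++ pvExpand ((h2, c2) :: t2))).take L.toNat =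
                List.replicate c.toNat h ++ (h2 :: (List.replicate (c2.toNat - 1) h2 ++ pvExpand t2)).take (L.toNat - c.toNat) := by
              have h3 : h :: (List.replicate (c.toNat - 1) h ++ pvExpand ((h2, c2) :: t2)) =
                  List.replicate c.toNat h ++ pvExpand ((h2, c2) :: t2) := by
                rw [hct, List.replicate_succ]; simp
              rw [h3, List.take_append, List.take_replicate, hexp2]
              congr 2
              · omega
              · simp
            rw [hwin]
            have hLc : L.toNat - c.toNat = (L.toNat - c.toNat - 1) + 1 := by omega
            rw [hLc, List.take_succ_cons]
            set s := List.replicate c.toNat h ++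
              (h2 :: ((List.replicate (c2.toNat - 1) h2 ++ pvExpand t2).take (L.toNat - c.toNat - 1))) with hs
            have hmem1 : h ∈ s := by
              rw [hs]
              apply List.mem_append_left
              rw [hct]
              exact List.mem_replicate.mpr ⟨by omega, rfl⟩
            have hmem2 : h2 ∈ s := by
              rw [hs]
              apply List.mem_append_right
              exact List.mem_cons_self
            rw [if_neg]
            intro h1
            obtain ⟨a, ha⟩ := List.length_eq_one_iff.mp h1
            have m1 : h ∈ PySem.Set.ofList s := by
              rw [PySem.Set.mem_ofList]; exact hmem1
            have m2 : h2 ∈ PySem.Set.ofList s := by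
              rw [PySem.Set.mem_ofList]; exact hmem2
            rw [ha] at m1 m2
            simp at m1 m2
            exact hh2 (m2.trans m1.symm)
      · -- |d| ≥ 2
        rw [if_pos (by omega : 2 ≤ (h - p).natAbs)]
        show _ = pvBScan L p b ((h, c) :: rest)
        rw [pvBScan]
        rw [if_neg (by omega : ¬(h - p = 1 ∧ b ≥ L)), if_neg (by omega : ¬(h - p = -1 ∧ c ≥ L))]

theorem pv_row (L : Int) (hL : 1 ≤ L) (xs : List Int) (hne : ∀ x ∈ xs, x ≠ -1) :
    pvAS L xs 0 (-1) = pvBRow L xs := by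
  cases xs with
  | nil => rfl
  | cons x t =>
    have hx : x ≠ -1 := hne x List.mem_cons_self
    obtain ⟨c', rest, heq, hle, hch, hmem⟩ := pv_rleF_chain t x 1 (le_refl _)
    have hexp1 : pvExpand ((x, c') :: rest) = x :: t := by
      rw [← heq, pv_expand_rleF t x 1 (by omega)]
      simp
    have hexp' : List.replicate c'.toNat x ++ pvExpand rest = x :: t := by
      simpa [pvExpand] using hexp1
    have hct : c'.toNat = (c'.toNat - 1) + 1 := by omega
    have ht : t = List.replicate (c'.toNat - 1) x ++ pvExpand rest := by
      rw [hct, List.replicate_succ] at hexp'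
      simp only [List.cons_append] at hexp'
      injection hexp' with _ h2
      exact h2.symm
    have hq : ∀ q ∈ rest, q.1 ≠ -1 := fun q hq =>
      hne q.1 (List.mem_cons_of_mem _ (hmem q hq))
    have hB : pvBRow L (x :: t) = pvBScan L x c' rest := by
      unfold pvBRow
      rw [pv_rle_spec, heq]
    simp only [pvAS]
    rw [if_pos (Or.inl trivial), hB, ht, pv_flat]
    have hb : (0 : Int) + 1 + ((c'.toNat - 1 : Nat) : Int) = c' := by omega
    rw [hb, pv_main L hL rest x c' hx hch hq]

theorem pv_bridge (n : Nat) (row : List Int) (N L : Int) : ∀ (j b p : Int),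
    (N - j).toNat = n → 0 ≤ j → N ≤ (row.length : Int) → 1 ≤ L →
    pvAInner row N L j b p = pvAS L ((row.take N.toNat).drop j.toNat) b p := by
  induction n with
  | zero =>
    intro j b p hn hj hN hL
    rw [pvAInner, dif_neg (by omega : ¬ j < N)]
    have hnil : (row.take N.toNat).drop j.toNat = [] := by
      apply List.drop_eq_nil_of_le
      simp [List.length_take]
      omega
    rw [hnil]
    simp [pvAS]
  | succ m ih =>
    intro j b p hn hj hN hL
    have hjN : j < N := by omega
    have hj1 : (j + 1).toNat = j.toNat + 1 := by omega
    have hjr : j.toNat < row.length := by omega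
    have hget : PySem.List.pyGet? row j = some row[j.toNat] :=
      PySem.List.pyGet?_eq_some_getElem row hj (by omega)
    have hdt : (row.take N.toNat).drop j.toNat =
        row[j.toNat] :: (row.take N.toNat).drop (j.toNat + 1) := by
      rw [List.drop_eq_getElem_cons (by simp [List.length_take]; omega)]
      congr 1
      simp
    rw [pvAInner, dif_pos hjN]
    simp only [hget, Option.getD_some]
    rw [hdt]
    simp only [pvAS]
    by_cases h1 : p = -1 ∨ row[j.toNat] - p = 0
    · rw [if_pos h1, if_pos h1, ih (j + 1) (b + 1) row[j.toNat] (by omega) (by omega) hN hL, hj1]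
    · rw [if_neg h1, if_neg h1]
      by_cases h2 : 2 ≤ (row[j.toNat] - p).natAbs
      · rw [if_pos h2, if_pos h2]
      · rw [if_neg h2, if_neg h2]
        by_cases h3 : row[j.toNat] - p = 1
        · rw [if_pos h3, if_pos h3]
          by_cases hbL : b < L
          · rw [if_pos hbL, if_pos hbL]
          · rw [if_neg hbL, if_neg hbL,
                ih (j + 1) 1 row[j.toNat] (by omega) (by omega) hN hL, hj1]
        · rw [if_neg h3, if_neg h3]
          by_cases h4 : row[j.toNat] - p = -1
          · rw [if_pos h4, if_pos h4]
            have hlenR : (((row[j.toNat] :: (row.take N.toNat).drop (j.toNat + 1)).length : Nat) : Int)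
                = N - j := by
              simp [List.length_take]
              omega
            rw [hlenR]
            by_cases h5 : N - j < L
            · rw [if_pos h5, if_pos h5]
            · rw [if_neg h5, if_neg h5]
              have hsl : PySem.List.slice row (some j) (some (j + L)) =
                  (row[j.toNat] :: (row.take N.toNat).drop (j.toNat + 1)).take L.toNat := by
                rw [← hdt, PySem.List.slice_toNat row hj (by omega), List.drop_take, List.take_take]
                congr 1
                omega
              rw [hsl]
              by_cases h6 : (PySem.Set.ofList
                  ((row[j.toNat] :: (row.take N.toNat).drop (j.toNat + 1)).take L.toNat)).length = 1
              · rw [if_pos h6, if_pos h6,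
                    ih (j + 1) (-(L - 1)) row[j.toNat] (by omega) (by omega) hN hL, hj1]
              · rw [if_neg h6, if_neg h6]
          · rw [if_neg h4, if_neg h4, ih (j + 1) b p (by omega) (by omega) hN hL, hj1]

-- ===== VERDICT (by name: the statement is the Claim_ definition above) =====
theorem getHorizontalCrossable_spec : Claim_equal_getHorizontalCrossable := by
  intro graph N L hdom hpre
  unfold Spec_getHorizontalCrossable getHorizontalCrossable getHorizontalCrossable_alt
  by_cases hNle : N ≤ 0
  · rw [PySem.List.pyRange_one_eq_nil hNle]
    rfl
  · have hN : 0 < N := by omega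
    obtain ⟨hL, hlen, hrows⟩ := hpre hN
    apply PySem.List.foldl_congr_mem
    intro acc i hi
    obtain ⟨hi0, hiN⟩ := PySem.List.mem_pyRange_one.mp hi
    have hilen : i.toNat < graph.length := by omega
    have hget : PySem.List.pyGet? graph i = some graph[i.toNat] :=
      PySem.List.pyGet?_eq_some_getElem graph hi0 (by omega)
    rw [hget]
    simp only [Option.getD_some]
    have hmem : graph[i.toNat] ∈ graph.take N.toNat := by
      have h1 : i.toNat < (graph.take N.toNat).length := by simp [List.length_take]; omega
      have h2 : (graph.take N.toNat)[i.toNat] = graph[i.toNat] := by simp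
      rw [← h2]
      exact List.getElem_mem h1
    obtain ⟨hrl, hrne⟩ := hrows _ hmem
    have hsl : PySem.List.slice graph[i.toNat] (some 0) (some N) = graph[i.toNat].take N.toNat := by
      rw [PySem.List.slice_zero_start, PySem.List.slice_to _ hN.le]
    have hbridge := pv_bridge (N - 0).toNat graph[i.toNat] N L 0 0 (-1) rfl (le_refl 0) hrl hL
    simp only [Int.toNat_zero, List.drop_zero] at hbridge
    have hrow := pv_row L hL (graph[i.toNat].take N.toNat) hrne
    simp only [hsl, hbridge, hrow]
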